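-- pv_equiv track=rewrite | github.com/lazydancer/Arrows | src/draft/maker/form.py | ports_left
-- ===== SOURCE A (Python) =====
-- def ports_left(level, connections):
--     result = []
--     for section in level:
--         result += sorted(list(map(
--             lambda x: x[0],
--             filter(
--                 lambda x: x[0][0] == section,
--                 connections
--             ))))
--
--     return result
-- ===== SOURCE B (Python) =====
-- def ports_left(level, connections):
--     # Group connection starts by their section key once, sort each group once,
--     # then emit the per-section lists by dictionary lookup.
--     groups = {}
--     for conn in connections:
--         groups.setdefault(conn[0][0], []).append(conn[0])
--     sorted_groups = {k: sorted(v) for k, v in groups.items()}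
--     out = []
--     for section in level:
--         out += sorted_groups.get(section, [])
--     return out
-- ===== Notes on version B (the rewrite author's own statement) =====
-- stated objective: faster
-- what changed: B groups connection starts into a dict keyed by section in one pass and sorts each group once, replacing A's per-section full scan and sort of the connection list.
import Mathlib
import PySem

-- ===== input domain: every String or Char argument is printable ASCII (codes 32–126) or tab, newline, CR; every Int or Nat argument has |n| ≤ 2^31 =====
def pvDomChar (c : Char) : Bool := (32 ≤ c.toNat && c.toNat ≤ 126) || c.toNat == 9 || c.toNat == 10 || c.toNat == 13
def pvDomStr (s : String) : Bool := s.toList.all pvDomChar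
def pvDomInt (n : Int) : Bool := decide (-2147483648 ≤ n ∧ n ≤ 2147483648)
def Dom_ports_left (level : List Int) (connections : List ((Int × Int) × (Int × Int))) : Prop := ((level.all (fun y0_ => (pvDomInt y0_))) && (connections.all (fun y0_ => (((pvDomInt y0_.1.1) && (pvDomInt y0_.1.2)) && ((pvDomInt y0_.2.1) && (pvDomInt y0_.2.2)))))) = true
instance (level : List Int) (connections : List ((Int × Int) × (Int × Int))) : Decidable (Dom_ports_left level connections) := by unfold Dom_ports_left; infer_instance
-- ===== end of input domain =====

-- B groups connection starts by section into a dict in one pass and sorts each group once,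
-- replacing A's per-section scan-and-sort of the whole connection list (objective: faster).

-- ===== PORT A =====
def ports_left (level : List Int) (connections : List ((Int × Int) × (Int × Int))) : List (Int × Int) :=
  level.foldl (fun result sec =>
    result ++ PySem.List.sorted2
      ((connections.filter (fun x => x.1.1 == sec)).map (fun x => x.1))
      (fun p => p.1) (fun p => p.2)) []

-- ===== PORT B =====
-- 'groups.setdefault(conn[0][0], []).append(conn[0])' loop of Source B
def pvGroupStarts (connections : List ((Int × Int) × (Int × Int))) : PySem.Dict Int (List (Int × Int)) :=
  connections.foldl (fun d conn => d.modify conn.1.1 [] (fun v => v ++ [conn.1])) PySem.Dict.empty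

-- 'sorted_groups = {k: sorted(v) for k, v in groups.items()}' of Source B
def pvSortedGroups (connections : List ((Int × Int) × (Int × Int))) : PySem.Dict Int (List (Int × Int)) :=
  PySem.Dict.mk ((pvGroupStarts connections).items.map
    (fun kv => (kv.1, PySem.List.sorted2 kv.2 (fun p => p.1) (fun p => p.2))))

def ports_left_alt (level : List Int) (connections : List ((Int × Int) × (Int × Int))) : List (Int × Int) :=
  level.foldl (fun out sec => out ++ (pvSortedGroups connections).getD sec []) []

-- ===== PRECONDITION & SPEC =====
def Spec_ports_left (level : List Int) (connections : List ((Int × Int) × (Int × Int))) (out : List (Int × Int)) : Prop := out = ports_left_alt level connections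
instance (level : List Int) (connections : List ((Int × Int) × (Int × Int))) (out : List (Int × Int)) : Decidable (Spec_ports_left level connections out) := by unfold Spec_ports_left; infer_instance

-- ===== CLAIM (what is proved, stated in full; the proofs are below) =====
def Claim_equal_ports_left : Prop := ∀ (level : List Int) (connections : List ((Int × Int) × (Int × Int))), Dom_ports_left level connections → Spec_ports_left level connections (ports_left level connections)

-- ===== LEMMAS AND PROOFS =====

-- looking a key up in a dict whose values were all rewritten by f
lemma get?_mk_mapVals (l : List (Int × List (Int × Int)))
    (f : List (Int × Int) → List (Int × Int)) (k : Int) :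
    (PySem.Dict.mk (l.map (fun kv => (kv.1, f kv.2)))).get? k
      = ((PySem.Dict.mk l).get? k).map f := by
  induction l with
  | nil => rfl
  | cons hd tl ih =>
      obtain ⟨kk, vv⟩ := hd
      simp only [List.map_cons, PySem.Dict.get?_mk_cons]
      by_cases h : kk == k
      · simp [h]
      · simp [h, ih]

-- the grouping loop of B collects, per key, exactly A's filtered starts in order
lemma getD_pvGroupStarts (connections : List ((Int × Int) × (Int × Int))) (k : Int) :
    (pvGroupStarts connections).getD k []
      = (connections.filter (fun x => x.1.1 == k)).map (fun x => x.1) := by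
  unfold pvGroupStarts
  have h : connections.foldl
        (fun d conn => d.modify conn.1.1 [] (fun v => v ++ [conn.1])) PySem.Dict.empty
      = (connections.map (fun x => (x.1.1, x.1))).foldl
        (fun d p => d.modify p.1 [] (fun v => v ++ [p.2])) PySem.Dict.empty := by
    rw [List.foldl_map]
  rw [h, PySem.Dict.getD_foldl_modify_append]
  simp [List.filter_map, Function.comp_def]

-- per section, B's looked-up sorted group is A's sorted filtered list
lemma lookup_eq_sorted (connections : List ((Int × Int) × (Int × Int))) (s : Int) :
    (pvSortedGroups connections).getD s []
      = PySem.List.sorted2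
          ((connections.filter (fun x => x.1.1 == s)).map (fun x => x.1))
          (fun p => p.1) (fun p => p.2) := by
  have hfm := getD_pvGroupStarts connections s
  unfold pvSortedGroups
  rw [PySem.Dict.getD_eq_get?_getD,
      get?_mk_mapVals ((pvGroupStarts connections).items)
        (fun v => PySem.List.sorted2 v (fun p => p.1) (fun p => p.2)) s]
  have hmk : PySem.Dict.mk (pvGroupStarts connections).items = pvGroupStarts connections := rfl
  rw [hmk]
  cases hg : (pvGroupStarts connections).get? s with
  | none =>
      rw [PySem.Dict.getD_eq_get?_getD, hg] at hfm
      simp [← hfm]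
      rfl
  | some v =>
      rw [PySem.Dict.getD_eq_get?_getD, hg] at hfm
      simp only [Option.map_some, Option.getD_some] at hfm ⊢
      rw [hfm]

-- ===== VERDICT (by name: the statement is the Claim_ definition above) =====
theorem ports_left_spec : Claim_equal_ports_left := by
  intro level connections _
  unfold Spec_ports_left ports_left ports_left_alt
  refine PySem.List.foldl_congr_mem _ _ _ _ ?_
  intro acc s _
  rw [lookup_eq_sorted]
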